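-- pv_equiv track=rewrite | github.com/MasterKira07/URI-Online | src/python/strings/2694 - #8903314(accepted).py | descartar_letras
-- ===== SOURCE A (Python) =====
-- def descartar_letras(lista):
--     """A função descarta todos as letras da palavra(lista) e faz
--     a jconcatenação dos numeros que estao juntos e retorna um nova lista com
--     os numeros que pertecem a palavra(lista)"""
--     nova_lista = []
--     numero = ""
--     chave = False
--     for i in range(len(lista)):
--         if(ord(lista[i]) >= 48 and  ord(lista[i]) <= 57):
--             numero += lista[i]
--             chave = True
--             if((len(lista) - 1) != i):
--                 continue
--         if(chave):
--             nova_lista.append(int(numero))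
--             numero = ""
--             chave = False
--     return nova_lista
-- ===== SOURCE B (Python) =====
-- def descartar_letras(lista):
--     """Keep only the maximal digit runs of the word: blank out every
--     non-digit character, then split on whitespace and convert each run."""
--     limpo = ''.join(c if '0' <= c <= '9' else ' ' for c in lista)
--     return [int(token) for token in limpo.split()]
-- ===== Notes on version B (the rewrite author's own statement) =====
-- stated objective: idiomatic
-- what changed: Replaces A's accumulator-plus-flag state machine (with a last-index special case) by blanking non-digits and letting str.split() extract the maximal digit runs in library passes.
import Mathlib
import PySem

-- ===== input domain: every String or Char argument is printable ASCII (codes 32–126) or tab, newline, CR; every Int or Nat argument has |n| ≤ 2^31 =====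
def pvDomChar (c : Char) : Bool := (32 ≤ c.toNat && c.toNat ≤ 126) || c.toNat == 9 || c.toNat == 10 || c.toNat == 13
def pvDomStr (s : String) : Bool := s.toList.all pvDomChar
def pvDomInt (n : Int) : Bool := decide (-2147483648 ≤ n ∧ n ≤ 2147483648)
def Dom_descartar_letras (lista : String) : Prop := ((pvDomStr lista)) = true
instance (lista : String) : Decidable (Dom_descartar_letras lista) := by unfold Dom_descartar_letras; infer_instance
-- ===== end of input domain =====

-- B blanks out non-digits and splits on whitespace instead of A's accumulator-plus-flag state machine (idiomatic rewrite, same cost).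


-- int(numero): numero is always a nonempty run of ASCII digits when converted, so ofChars? is always some (getD 0 is unreachable)
def pvToInt (tok : List Char) : Int := (PySem.Int.ofChars? tok).getD 0

-- ===== PORT A =====
-- the for-i-in-range loop over the characters, carrying (nova_lista, numero, chave);
-- "(len(lista)-1) != i" is "rest ≠ []"; on the last digit the fall-through `if chave:` always flushes (chave was just set True)
def descartarLoop : List Char → List Int → List Char → Bool → List Int
  | [], nova, _, _ => nova
  | c :: rest, nova, numero, chave =>
    if 48 ≤ c.toNat ∧ c.toNat ≤ 57 then
      if rest ≠ [] then
        descartarLoop rest nova (numero ++ [c]) true      -- continue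
      else
        descartarLoop rest (nova ++ [pvToInt (numero ++ [c])]) [] false   -- last index: fall through, chave = True
    else
      if chave then descartarLoop rest (nova ++ [pvToInt numero]) [] false
      else descartarLoop rest nova numero chave

def descartar_letras (lista : String) : List Int :=
  descartarLoop lista.toList [] [] false

-- ===== PORT B =====
def pvBlank (c : Char) : Char := if 48 ≤ c.toNat ∧ c.toNat ≤ 57 then c else ' '

def descartar_letras_alt (lista : String) : List Int :=
  let limpo := lista.toList.map pvBlank                    -- ''.join(c if digit else ' ' ...)
  (PySem.Chars.split₀ limpo).map pvToInt                   -- [int(token) for token in limpo.split()]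

-- ===== PRECONDITION & SPEC =====
def Spec_descartar_letras (lista : String) (out : List Int) : Prop := out = descartar_letras_alt lista
instance (lista : String) (out : List Int) : Decidable (Spec_descartar_letras lista out) := by unfold Spec_descartar_letras; infer_instance

-- ===== CLAIM (what is proved, stated in full; the proofs are below) =====
def Claim_equal_descartar_letras : Prop := ∀ (lista : String), Dom_descartar_letras lista → Spec_descartar_letras lista (descartar_letras lista)

-- ===== LEMMAS AND PROOFS =====
lemma isspace_of_digit (c : Char) (h1 : 48 ≤ c.toNat) (h2 : c.toNat ≤ 57) :
    PySem.Chars.isspace c = false := by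
  simp [PySem.Chars.isspace]; omega

lemma loop_eq_go (rest : List Char) : ∀ (cur : List Char) (acc : List (List Char)), (rest = [] → cur = []) →
    descartarLoop rest ((acc.reverse).map pvToInt) cur (!cur.isEmpty)
      = (PySem.Chars.split₀.go (rest.map pvBlank) cur.reverse acc).map pvToInt := by
  induction rest with
  | nil =>
      intro cur acc h
      rw [h rfl]
      simp [descartarLoop, PySem.Chars.split₀.go]
  | cons c rest ih =>
      intro cur acc h
      by_cases hd : 48 ≤ c.toNat ∧ c.toNat ≤ 57
      · have hb : pvBlank c = c := by simp [pvBlank, hd]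
        have hs : PySem.Chars.isspace c = false := isspace_of_digit c hd.1 hd.2
        by_cases hr : rest = []
        · subst hr
          simp only [descartarLoop, hd]
          simp [PySem.Chars.split₀.go, hb, hs, pvToInt]
        · simp only [descartarLoop, hd, if_true, hr, ne_eq, not_false_iff, if_true,
            List.map_cons, hb, PySem.Chars.split₀.go, hs]
          have := ih (cur ++ [c]) acc (fun hc => absurd hc hr)
          rw [show ((cur ++ [c]).isEmpty) = false by simp] at this
          simpa using this
      · have hb : pvBlank c = ' ' := by simp [pvBlank, hd]
        have hs : PySem.Chars.isspace ' ' = true := by decide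
        cases cur with
        | nil =>
            simp only [descartarLoop, hd, if_false, List.isEmpty_nil, Bool.not_true,
              Bool.false_eq_true, if_false, List.map_cons, hb, PySem.Chars.split₀.go, hs]
            simpa using ih [] acc (fun _ => rfl)
        | cons x xs =>
            simp only [descartarLoop, hd, if_false, List.isEmpty_cons, Bool.not_false,
              if_true, List.map_cons, hb, PySem.Chars.split₀.go, hs]
            have := ih [] ((x :: xs) :: acc) (fun _ => rfl)
            simpa using this

-- ===== VERDICT (by name: the statement is the Claim_ definition above) =====
theorem descartar_letras_spec : Claim_equal_descartar_letras := by
  intro lista _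
  unfold Spec_descartar_letras descartar_letras descartar_letras_alt PySem.Chars.split₀
  simpa using loop_eq_go lista.toList [] [] (fun _ => rfl)
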